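-- pv_equiv track=rewrite | github.com/GreenBankObservatory/dysh | src/dysh/util/core.py | minimum_list_match
-- ===== SOURCE A (Python) =====
-- def minimum_string_match(s, valid_strings, casefold=False):
--     """
--     return the valid string from a list, given a minimum string input
--
--     Example:  minimum_string_match('a',['alpha','beta','gamma'])
--     returns:  'alpha'
--
--     Parameters
--     ----------
--     s : string
--         string to use for minimum match
--     valid_strings : list of strings
--         list of full strings to minimum match on.
--     casefold: bool
--         If True, do a case insensitive match
--
--     Returns
--     -------
--     string
--         matched string, if one is found.  An exact match will
--         also count as a match, even if others are present with
--         longer match.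
--         Otherwise "None" is returned.
--
--     """
--     n = len(valid_strings)
--     if casefold:
--         vsfold = [a.casefold() for a in valid_strings]
--         s = s.casefold()
--     else:
--         vsfold = valid_strings
--     m = []
--     for i in range(n):
--         if vsfold[i].find(s) == 0:
--             m.append(i)
--     if len(m) >= 1:
--         return valid_strings[m[0]]
--     return None
--
-- def minimum_list_match(strings, valid_strings, casefold=False):
--     """
--     Return the list of valid strings given a list of minimum string inputs.
--
--     Parameters
--     ----------
--     strings : str or list of str
--         The strings to compare for minimum match
--     valid_strings : list of str
--         list of full strings to min match on.
--     casefold: bool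
--         If True, do a case insensitive match
--
--     Returns
--     -------
--     list
--         List of all minimum matches or None if no matches found
--
--     """
--     valid = []
--     # if user passes in a string instead of a list, it should act like minimum_string_match
--     # Note: strings=list(strings) is not the same as [strings]!
--     if isinstance(strings, str):
--         strings = [strings]
--     for s in strings:
--         p = minimum_string_match(s, valid_strings, casefold)
--         if p is not None:
--             valid.append(p)
--     if len(valid) == 0:
--         return None
--     else:
--         return valid
-- ===== SOURCE B (Python) =====
-- def minimum_list_match(strings, valid_strings, casefold=False):
--     # Build once: every prefix of every (folded) valid string -> earliest original string.
--     if isinstance(strings, str):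
--         strings = [strings]
--     table = {}
--     for w in valid_strings:
--         key = w.casefold() if casefold else w
--         for i in range(len(key) + 1):
--             table.setdefault(key[:i], w)
--     valid = []
--     for s in strings:
--         q = s.casefold() if casefold else s
--         if q in table:
--             valid.append(table[q])
--     if valid == []:
--         return None
--     return valid
-- ===== Notes on version B (the rewrite author's own statement) =====
-- stated objective: faster
-- what changed: Instead of scanning every valid string per query (and per query re-folding the whole list), B builds a dict mapping every prefix of every (folded) valid string to the earliest matching original string once, then answers each query with a single dict lookup.
import Mathlib
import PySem

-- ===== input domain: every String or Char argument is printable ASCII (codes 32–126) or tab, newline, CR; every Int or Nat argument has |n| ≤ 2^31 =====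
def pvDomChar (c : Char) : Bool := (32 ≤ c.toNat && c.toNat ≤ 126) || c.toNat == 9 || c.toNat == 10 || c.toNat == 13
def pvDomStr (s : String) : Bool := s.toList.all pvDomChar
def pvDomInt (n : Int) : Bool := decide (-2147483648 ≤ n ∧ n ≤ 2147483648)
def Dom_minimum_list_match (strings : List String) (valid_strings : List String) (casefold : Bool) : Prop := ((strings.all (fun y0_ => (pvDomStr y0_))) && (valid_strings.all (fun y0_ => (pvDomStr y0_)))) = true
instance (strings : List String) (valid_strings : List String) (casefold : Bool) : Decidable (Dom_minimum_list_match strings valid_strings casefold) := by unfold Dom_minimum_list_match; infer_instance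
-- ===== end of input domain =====

-- B replaces A's per-query linear scan of valid_strings with a prefix dictionary built once
-- (every prefix of every folded valid string -> earliest original string), one lookup per query.
-- str.casefold is ported as PySem.Str.lower (equal on the ASCII domain).

-- ===== PORT A =====
-- helper of A: minimum_string_match.  m collects the matching indices; `len(m) >= 1` and
-- `valid_strings[m[0]]` are ported literally (m.getD 0 0 is m[0] on the nonempty branch;
-- pyGet? is `some` there since every collected index is < n).
def pv_minimum_string_match (s : String) (valid_strings : List String) (casefold : Bool) : Option String :=
  let n := valid_strings.length
  let vsfold := if casefold then valid_strings.map PySem.Str.lower else valid_strings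
  let s' := if casefold then PySem.Str.lower s else s
  let m : List Nat := (List.range n).foldl
    (fun m i => if PySem.Str.find (vsfold.getD i "") s' = 0 then m ++ [i] else m) []
  if 1 ≤ m.length then PySem.List.pyGet? valid_strings ((m.getD 0 0 : Nat) : Int) else none

-- the `isinstance(strings, str)` branch is unreachable under the `List String` typing of `strings`;
-- `p = …; if p is not None: valid.append(p)` is ported with Option.elim.
def minimum_list_match (strings : List String) (valid_strings : List String) (casefold : Bool) : Option (List String) :=
  let valid := strings.foldl
    (fun valid s => (pv_minimum_string_match s valid_strings casefold).elim valid (fun p => valid ++ [p])) []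
  if valid.length = 0 then none else some valid

-- ===== PORT B =====
-- B's inner loop: `for i in range(len(key) + 1): table.setdefault(key[:i], w)`
def pvAddPrefixes (table : PySem.Dict String String) (w key : String) : PySem.Dict String String :=
  (List.range (key.toList.length + 1)).foldl
    (fun table (i : Nat) => table.setdefault (PySem.Str.slice key none (some (i : Int))) w) table

def pvAltTable (valid_strings : List String) (casefold : Bool) : PySem.Dict String String :=
  valid_strings.foldl
    (fun table w => pvAddPrefixes table w (if casefold then PySem.Str.lower w else w))
    PySem.Dict.empty

-- `if q in table: valid.append(table[q])` is ported with Option.elim on table.get? q.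
def minimum_list_match_alt (strings : List String) (valid_strings : List String) (casefold : Bool) : Option (List String) :=
  let table := pvAltTable valid_strings casefold
  let valid := strings.foldl
    (fun valid s => (table.get? (if casefold then PySem.Str.lower s else s)).elim valid (fun w => valid ++ [w])) []
  if valid = [] then none else some valid

-- ===== PRECONDITION & SPEC =====
def Spec_minimum_list_match (strings : List String) (valid_strings : List String) (casefold : Bool) (out : Option (List String)) : Prop := out = minimum_list_match_alt strings valid_strings casefold
instance (strings : List String) (valid_strings : List String) (casefold : Bool) (out : Option (List String)) : Decidable (Spec_minimum_list_match strings valid_strings casefold out) := by unfold Spec_minimum_list_match; infer_instance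

-- ===== CLAIM (what is proved, stated in full; the proofs are below) =====
def Claim_equal_minimum_list_match : Prop := ∀ (strings : List String) (valid_strings : List String) (casefold : Bool), Dom_minimum_list_match strings valid_strings casefold → Spec_minimum_list_match strings valid_strings casefold (minimum_list_match strings valid_strings casefold)

-- ===== LEMMAS AND PROOFS =====

-- the first valid string whose folded form has q as a prefix (shared characterisation of both ports)
def pvFirst (q : String) (ws : List String) (cf : Bool) : Option String :=
  ws.find? (fun w => decide (q.toList <+: (if cf then PySem.Str.lower w else w).toList))

theorem pv_find_eq_zero_iff (s sub : List Char) : PySem.Chars.find s sub = 0 ↔ sub <+: s := by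
  constructor
  · intro h
    have := (PySem.Chars.find_spec (s := s) (sub := sub) (by rw [h])).1
    simpa [h] using this
  · intro h
    have hnn : 0 ≤ PySem.Chars.find s sub :=
      (PySem.Chars.find_nonneg_iff s sub).mpr h.isInfix
    by_contra hne
    have hpos : 0 < (PySem.Chars.find s sub).toNat := by omega
    exact (PySem.Chars.find_spec hnn).2 0 hpos (by simpa using h)

theorem pv_get?_foldl_setdefault (w : String) (pref : Nat → String) (l : List Nat)
    (d : PySem.Dict String String) (q : String) :
    (l.foldl (fun d i => d.setdefault (pref i) w) d).get? q =
      if q ∈ l.map pref then some ((d.get? q).getD w) else d.get? q := by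
  induction l generalizing d with
  | nil => simp
  | cons i l ih =>
    simp only [List.foldl_cons, List.map_cons, List.mem_cons]
    rw [ih]
    by_cases hq : q = pref i
    · subst hq
      rw [PySem.Dict.get?_setdefault_self]
      by_cases hm : pref i ∈ l.map pref <;> simp [hm]
    · rw [PySem.Dict.get?_setdefault_of_ne _ _ hq]
      by_cases hm : q ∈ l.map pref <;> simp [hm, hq]

theorem pv_mem_prefixes_iff (key q : String) :
    q ∈ (List.range (key.toList.length + 1)).map
        (fun (i : Nat) => PySem.Str.slice key none (some (i : Int))) ↔ q.toList <+: key.toList := by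
  simp only [List.mem_map, List.mem_range]
  constructor
  · rintro ⟨i, _, rfl⟩
    have : (PySem.Str.slice key none (some (i : Int))).toList = key.toList.take i := by
      rw [PySem.Str.toList_slice]
      exact PySem.List.slice_to_natCast key.toList i
    rw [this]
    exact List.take_prefix i key.toList
  · intro h
    refine ⟨q.toList.length, by have := h.length_le; omega, ?_⟩
    apply String.toList_inj.mp
    rw [PySem.Str.toList_slice]
    rw [show PySem.Chars.slice key.toList none (some (q.toList.length : Int)) =
          key.toList.take q.toList.length from PySem.List.slice_to_natCast _ _]
    exact (List.prefix_iff_eq_take.mp h).symm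

theorem pv_table_get? (ws : List String) (cf : Bool) (d : PySem.Dict String String) (q : String) :
    ((ws.foldl (fun table w => pvAddPrefixes table w (if cf then PySem.Str.lower w else w)) d).get? q)
      = ((d.get? q).orElse (fun _ => pvFirst q ws cf)) := by
  induction ws generalizing d with
  | nil => cases h : d.get? q <;> simp [pvFirst, h]
  | cons w ws ih =>
    simp only [List.foldl_cons]
    rw [ih]
    simp only [pvAddPrefixes]
    rw [pv_get?_foldl_setdefault w
      (fun (i : Nat) => PySem.Str.slice (if cf then PySem.Str.lower w else w) none (some (i : Int)))]
    simp only [pv_mem_prefixes_iff]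
    by_cases hp : q.toList <+: (if cf then PySem.Str.lower w else w).toList
    · cases h : d.get? q <;> simp [pvFirst, hp]
    · cases h : d.get? q <;> simp [pvFirst, hp]

theorem pv_head_filter_range {α : Type} (xs : List α) (p : α → Bool) (d : α) :
    (((List.range xs.length).filter (fun i => p (xs.getD i d))).head?.bind (fun i => xs[i]?))
      = xs.find? p := by
  induction xs with
  | nil => simp
  | cons x xs ih =>
    rw [List.length_cons, List.range_succ_eq_map]
    by_cases hx : p x
    · simp [hx, List.getD]
    · simp only [List.filter_cons, List.getD_cons_zero, hx, Bool.false_eq_true,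
        not_false_eq_true, if_neg, List.filter_map, List.find?_cons, List.head?_map]
      have hcomp : ((fun i => p ((x :: xs).getD i d)) ∘ Nat.succ) = fun i => p (xs.getD i d) := by
        funext i; rfl
      rw [hcomp]
      rw [show ∀ (fl : List Nat), (fl.head?.map Nat.succ).bind (fun i => (x :: xs)[i]?)
            = fl.head?.bind (fun i => xs[i]?) from fun fl => by cases fl with
            | nil => rfl
            | cons a t => rfl]
      exact ih

-- A's `if len(m) >= 1 … valid_strings[m[0]]` tail as head?.bind
theorem pv_if_head (vs : List String) (fl : List Nat) :
    (if 1 ≤ fl.length then PySem.List.pyGet? vs ((fl.getD 0 0 : Nat) : Int) else none)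
      = fl.head?.bind (fun i => vs[i]?) := by
  cases fl <;> simp [PySem.List.pyGet?_natCast]

-- one branch of minimum_string_match: collected indices, first hit, as find?
theorem pv_branch (vs : List String) (P : String → Prop) [DecidablePred P] :
    (if 1 ≤ ((List.range vs.length).foldl
          (fun m (i : Nat) => if P (vs.getD i "") then m ++ [i] else m) []).length
     then PySem.List.pyGet? vs ((((List.range vs.length).foldl
          (fun m (i : Nat) => if P (vs.getD i "") then m ++ [i] else m) []).getD 0 0 : Nat) : Int)
     else none)
      = vs.find? (fun w => decide (P w)) := by
  rw [show (fun (m : List Nat) (i : Nat) => if P (vs.getD i "") then m ++ [i] else m)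
        = (fun m i => if (fun j => decide (P (vs.getD j ""))) i = true then m ++ [(fun (j : Nat) => j) i] else m)
      from by funext m i; simp]
  rw [PySem.List.foldl_append_if]
  simp only [List.nil_append, List.map_id']
  rw [pv_if_head]
  exact pv_head_filter_range vs (fun w => decide (P w)) ""

theorem pv_getD_map_lower (l : List String) (i : Nat) :
    (l.map PySem.Str.lower).getD i "" = PySem.Str.lower (l.getD i "") := by
  cases h : l[i]? <;> simp [List.getD_eq_getElem?_getD, List.getElem?_map, h] <;> rfl

theorem pv_msm_eq (s : String) (vs : List String) (cf : Bool) :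
    pv_minimum_string_match s vs cf = pvFirst (if cf then PySem.Str.lower s else s) vs cf := by
  cases cf with
  | false =>
    simp only [pv_minimum_string_match, pvFirst, Bool.false_eq_true, if_false]
    rw [pv_branch vs (fun w => PySem.Str.find w s = 0)]
    rw [show (fun w : String => decide (PySem.Str.find w s = 0))
          = (fun w : String => decide (s.toList <+: w.toList)) from by
      funext w
      simp only [PySem.Str.find_eq, decide_eq_decide]
      exact pv_find_eq_zero_iff w.toList s.toList]
  | true =>
    simp only [pv_minimum_string_match, pvFirst, if_true]
    rw [show (fun (m : List Nat) (i : Nat) =>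
            if PySem.Str.find ((vs.map PySem.Str.lower).getD i "") (PySem.Str.lower s) = 0
            then m ++ [i] else m)
          = (fun m i =>
            if PySem.Str.find (PySem.Str.lower (vs.getD i "")) (PySem.Str.lower s) = 0
            then m ++ [i] else m) from by
      funext m i; rw [pv_getD_map_lower]]
    rw [pv_branch vs (fun w => PySem.Str.find (PySem.Str.lower w) (PySem.Str.lower s) = 0)]
    rw [show (fun w : String => decide (PySem.Str.find (PySem.Str.lower w) (PySem.Str.lower s) = 0))
          = (fun w : String => decide ((PySem.Str.lower s).toList <+: (PySem.Str.lower w).toList)) from by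
      funext w
      simp only [PySem.Str.find_eq, decide_eq_decide]
      exact pv_find_eq_zero_iff _ _]

theorem pv_msm_table (s : String) (vs : List String) (cf : Bool) :
    pv_minimum_string_match s vs cf
      = (pvAltTable vs cf).get? (if cf then PySem.Str.lower s else s) := by
  rw [pv_msm_eq]
  rw [show pvAltTable vs cf
        = vs.foldl (fun table w => pvAddPrefixes table w (if cf then PySem.Str.lower w else w))
            PySem.Dict.empty from rfl]
  rw [pv_table_get?]
  simp

theorem pv_main_fold (strings vs : List String) (cf : Bool) (acc : List String) :
    strings.foldl
        (fun valid s => (pv_minimum_string_match s vs cf).elim valid (fun p => valid ++ [p])) acc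
      = strings.foldl
        (fun valid s => ((pvAltTable vs cf).get? (if cf then PySem.Str.lower s else s)).elim valid
          (fun w => valid ++ [w])) acc := by
  induction strings generalizing acc with
  | nil => rfl
  | cons s rest ih =>
    simp only [List.foldl_cons]
    rw [pv_msm_table]
    exact ih _

-- ===== VERDICT (by name: the statement is the Claim_ definition above) =====
theorem minimum_list_match_spec : Claim_equal_minimum_list_match := by
  intro strings vs cf _
  unfold Spec_minimum_list_match
  simp only [minimum_list_match, minimum_list_match_alt]
  rw [pv_main_fold]
  cases hL : strings.foldl
      (fun valid s => ((pvAltTable vs cf).get? (if cf then PySem.Str.lower s else s)).elim valid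
        (fun w => valid ++ [w])) [] with
  | nil => simp
  | cons a t => simp
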